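-- pv_equiv track=rewrite | github.com/wknclizu/Quorion2 | gen_plans.py | find_spanning_tree
-- ===== SOURCE A (Python) =====
-- def find_spanning_tree(nodes, edges):
--     """
--     Build a spanning tree with Union-Find.
--     Returns (tree_edges, extra_edges_that_cause_cycles).
--     """
--     parent = {n: n for n in nodes}
--     rank = {n: 0 for n in nodes}
--
--     def find(x):
--         while parent[x] != x:
--             parent[x] = parent[parent[x]]
--             x = parent[x]
--         return x
--
--     def union(x, y):
--         px, py = find(x), find(y)
--         if px == py:
--             return False
--         if rank[px] < rank[py]:
--             px, py = py, px
--         parent[py] = px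
--         if rank[px] == rank[py]:
--             rank[px] += 1
--         return True
--
--     tree_edges = []
--     extra_edges = []
--     for u, v in edges:
--         if union(u, v):
--             tree_edges.append((u, v))
--         else:
--             extra_edges.append((u, v))
--
--     return tree_edges, extra_edges
-- ===== SOURCE B (Python) =====
-- def find_spanning_tree(nodes, edges):
--     """
--     Build a spanning tree by label propagation (quick-union with relabelling).
--     Returns (tree_edges, extra_edges_that_cause_cycles).
--     """
--     comp = {n: n for n in nodes}
--     tree_edges = []
--     extra_edges = []
--     for u, v in edges:
--         cu, cv = comp[u], comp[v]
--         if cu == cv: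
--             extra_edges.append((u, v))
--         else:
--             comp = {n: (cu if c == cv else c) for n, c in comp.items()}
--             tree_edges.append((u, v))
--     return tree_edges, extra_edges
-- ===== Notes on version B (the rewrite author's own statement) =====
-- stated objective: simpler
-- what changed: Replaces the parent-pointer union-find (path halving, union by rank, an inner find loop) by a flat node-to-label dict: find is a single O(1) lookup and union relabels the losing component in one dict comprehension, so the helper functions disappear.
import Mathlib
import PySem

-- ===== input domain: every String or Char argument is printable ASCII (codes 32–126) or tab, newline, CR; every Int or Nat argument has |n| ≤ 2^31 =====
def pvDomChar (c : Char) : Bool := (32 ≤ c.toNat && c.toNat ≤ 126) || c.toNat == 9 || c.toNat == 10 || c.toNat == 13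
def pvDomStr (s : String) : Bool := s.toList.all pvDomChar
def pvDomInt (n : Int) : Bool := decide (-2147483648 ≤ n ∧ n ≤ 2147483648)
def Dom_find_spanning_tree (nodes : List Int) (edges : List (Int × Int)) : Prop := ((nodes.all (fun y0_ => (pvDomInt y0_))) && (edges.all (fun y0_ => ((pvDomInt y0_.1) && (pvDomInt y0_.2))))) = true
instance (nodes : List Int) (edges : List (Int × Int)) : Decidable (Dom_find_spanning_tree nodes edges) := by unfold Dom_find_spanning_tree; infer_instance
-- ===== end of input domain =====

-- B replaces A's parent-pointer union-find (path halving, union by rank) by a flat node→label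
-- dict: find is one lookup and union relabels the losing component (objective: simpler).

-- ===== PORT A =====
-- `find`: `while parent[x] != x: parent[x] = parent[parent[x]]; x = parent[x]`, threading the
-- mutated dict.  The fuel argument (number of dict entries at the call site) is only a totality
-- guard, proved sufficient below; the `none` branches are Python's KeyError, excluded by Pre_.
def pvFindA : Nat → PySem.Dict Int Int → Int → PySem.Dict Int Int × Int
  | 0, p, x => (p, x)
  | f+1, p, x =>
    match p.get? x with
    | none => (p, x)
    | some px =>
      if px = x then (p, x)
      else
        match p.get? px with
        | none => (p, x)
        | some ppx => pvFindA f (p.insert x ppx) ppx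

-- `union(x, y)`: two finds, early False on equal roots, else link by rank (the `q` pair is the
-- swap `px, py = py, px`) and bump the rank on equality.
def pvUnionA (p r : PySem.Dict Int Int) (x y : Int) :
    PySem.Dict Int Int × PySem.Dict Int Int × Bool :=
  let s1 := pvFindA p.items.length p x
  let s2 := pvFindA s1.1.items.length s1.1 y
  if s1.2 = s2.2 then (s2.1, r, false)
  else
    let q := if r.getD s1.2 0 < r.getD s2.2 0 then (s2.2, s1.2) else (s1.2, s2.2)
    let p3 := s2.1.insert q.2 q.1
    let r3 := if r.getD q.1 0 = r.getD q.2 0 then r.insert q.1 (r.getD q.1 0 + 1) else r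
    (p3, r3, true)

-- one iteration of `for u, v in edges`: append the edge to tree_edges or extra_edges
def pvStepA (st : PySem.Dict Int Int × PySem.Dict Int Int × List (Int × Int) × List (Int × Int))
    (e : Int × Int) :
    PySem.Dict Int Int × PySem.Dict Int Int × List (Int × Int) × List (Int × Int) :=
  let w := pvUnionA st.1 st.2.1 e.1 e.2
  if w.2.2 then (w.1, w.2.1, st.2.2.1 ++ [e], st.2.2.2)
  else (w.1, w.2.1, st.2.2.1, st.2.2.2 ++ [e])

def find_spanning_tree (nodes : List Int) (edges : List (Int × Int)) : (List (Int × Int)) × (List (Int × Int)) :=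
  let parent := nodes.foldl (fun d n => d.insert n n) PySem.Dict.empty
  let rank := nodes.foldl (fun d n => d.insert n (0 : Int)) PySem.Dict.empty
  let st := edges.foldl pvStepA (parent, rank, ([] : List (Int × Int)), ([] : List (Int × Int)))
  (st.2.2.1, st.2.2.2)

-- ===== PORT B =====
-- `{n: (cu if c == cv else c) for n, c in comp.items()}`: a dict comprehension over the items of
-- a dict revisits its (distinct) keys in order, so it is the item list mapped in place.
def pvRelabel (c : PySem.Dict Int Int) (cv cu : Int) : PySem.Dict Int Int :=
  PySem.Dict.mk (c.items.map (fun q => (q.1, if q.2 = cv then cu else q.2)))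

-- one iteration of B's loop: compare the two labels, append, relabel on merge
def pvStepB (st : PySem.Dict Int Int × List (Int × Int) × List (Int × Int)) (e : Int × Int) :
    PySem.Dict Int Int × List (Int × Int) × List (Int × Int) :=
  match st.1.get? e.1, st.1.get? e.2 with
  | some cu, some cv =>
    if cu = cv then (st.1, st.2.1, st.2.2 ++ [e])
    else (pvRelabel st.1 cv cu, st.2.1 ++ [e], st.2.2)
  | _, _ => (st.1, st.2.1, st.2.2)

def find_spanning_tree_alt (nodes : List Int) (edges : List (Int × Int)) : (List (Int × Int)) × (List (Int × Int)) :=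
  let comp := nodes.foldl (fun d n => d.insert n n) PySem.Dict.empty
  let st := edges.foldl pvStepB (comp, ([] : List (Int × Int)), ([] : List (Int × Int)))
  (st.2.1, st.2.2)

-- ===== PRECONDITION & SPEC =====
-- Pre_ excludes exactly the inputs on which A raises KeyError: an edge endpoint not in `nodes`.
def Pre_find_spanning_tree (nodes : List Int) (edges : List (Int × Int)) : Prop :=
  ∀ e ∈ edges, e.1 ∈ nodes ∧ e.2 ∈ nodes

instance (nodes : List Int) (edges : List (Int × Int)) : Decidable (Pre_find_spanning_tree nodes edges) := by unfold Pre_find_spanning_tree; infer_instance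

def pvWitness_find_spanning_tree : List Int × (List (Int × Int)) :=
  ([1, 2, 3, 4], [(1, 2), (2, 3), (1, 3), (4, 4)])

def Spec_find_spanning_tree (nodes : List Int) (edges : List (Int × Int)) (out : (List (Int × Int)) × (List (Int × Int))) : Prop := out = find_spanning_tree_alt nodes edges
instance (nodes : List Int) (edges : List (Int × Int)) (out : (List (Int × Int)) × (List (Int × Int))) : Decidable (Spec_find_spanning_tree nodes edges out) := by unfold Spec_find_spanning_tree; infer_instance

-- ===== CLAIM (what is proved, stated in full; the proofs are below) =====
def Claim_equal_find_spanning_tree : Prop := ∀ (nodes : List Int) (edges : List (Int × Int)), Dom_find_spanning_tree nodes edges → Pre_find_spanning_tree nodes edges → Spec_find_spanning_tree nodes edges (find_spanning_tree nodes edges)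

-- ===== LEMMAS AND PROOFS =====

-- the dict read `d[x]` as a total function (the default never matters on keys)
def pvF (d : PySem.Dict Int Int) (x : Int) : Int := d.getD x x

theorem pv_get?_mem (d : PySem.Dict Int Int) (x : Int) (hx : x ∈ d.keys) :
    d.get? x = some (pvF d x) := by
  cases h : d.get? x with
  | none => exact absurd ((PySem.Dict.get?_eq_none_iff_not_mem_keys d x).mp h) (by simp [hx])
  | some v => rw [pvF, PySem.Dict.getD_of_get?_eq_some d x h]

theorem pvF_insert (d : PySem.Dict Int Int) (k v z : Int) :
    pvF (d.insert k v) z = if z = k then v else pvF d z := by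
  simp [pvF, PySem.Dict.getD_insert]

theorem pv_keys_insert (d : PySem.Dict Int Int) (k v : Int) (hk : k ∈ d.keys) :
    (d.insert k v).keys = d.keys :=
  PySem.Dict.keys_insert_of_contains d v ((PySem.Dict.contains_iff_mem_keys d k).mpr hk)

theorem pv_keys_len (p : PySem.Dict Int Int) : p.keys.length = p.items.length := by
  show (p.items.map Prod.fst).length = p.items.length
  exact List.length_map _

theorem pv_init_get? (nodes : List Int) (d : PySem.Dict Int Int) (z : Int) :
    (nodes.foldl (fun d n => d.insert n n) d).get? z =
      if z ∈ nodes then some z else d.get? z := by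
  induction nodes generalizing d with
  | nil => simp
  | cons n ns ih =>
    simp only [List.foldl_cons, ih, List.mem_cons]
    by_cases h1 : z ∈ ns
    · simp [h1]
    · by_cases h2 : z = n <;> simp [h1, h2, PySem.Dict.get?_insert]

theorem pvRelabelList_get? (l : List (Int × Int)) (cv cu x : Int) :
    (PySem.Dict.mk (l.map (fun q => (q.1, if q.2 = cv then cu else q.2)))).get? x =
      ((PySem.Dict.mk l).get? x).map (fun w => if w = cv then cu else w) := by
  induction l with
  | nil => simp [PySem.Dict.get?]
  | cons q l ih =>
    obtain ⟨k, v⟩ := q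
    simp only [List.map_cons, PySem.Dict.get?_mk_cons, ih]
    by_cases h : (k == x) = true <;> simp [h]

theorem pvRelabel_keys (c : PySem.Dict Int Int) (cv cu : Int) :
    (pvRelabel c cv cu).keys = c.keys := by
  show (c.items.map _).map Prod.fst = c.items.map Prod.fst
  simp

theorem pvRelabel_get? (c : PySem.Dict Int Int) (cv cu x : Int) :
    (pvRelabel c cv cu).get? x = (c.get? x).map (fun w => if w = cv then cu else w) := by
  have := pvRelabelList_get? c.items cv cu x
  exact this

theorem pvF_relabel (c : PySem.Dict Int Int) (cv cu z : Int) (hz : z ∈ c.keys) :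
    pvF (pvRelabel c cv cu) z = if pvF c z = cv then cu else pvF c z := by
  have h := pv_get?_mem c z hz
  have h2 : (pvRelabel c cv cu).get? z = some (if pvF c z = cv then cu else pvF c z) := by
    rw [pvRelabel_get?, h]; rfl
  rw [pvF, PySem.Dict.getD_of_get?_eq_some _ z h2]

theorem pvCountP_two (K : List Int) (g : Int → Int) (cu cv : Int) (h : cu ≠ cv) :
    K.countP (fun y => g y = cu || g y = cv) =
      K.countP (fun y => g y = cu) + K.countP (fun y => g y = cv) := by
  induction K with
  | nil => simp
  | cons a l ih =>
    simp only [List.countP_cons, ih]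
    by_cases h1 : g a = cu <;> by_cases h2 : g a = cv <;> simp [h1, h2, h, Ne.symm h] <;> omega

-- The coupling invariant between A's forest `p` and B's labelling `c`, with an abstract measure
-- m for A's find loop: keys agree; parent pointers stay inside the keys and preserve the label;
-- distinct roots carry distinct labels; m strictly decreases along pointers, vanishes at roots,
-- and is bounded by the size of the node's component.
def pvInv (p c : PySem.Dict Int Int) (m : Int → Nat) : Prop :=
  p.keys = c.keys ∧ p.keys.Nodup ∧
  (∀ x ∈ p.keys, pvF p x ∈ p.keys) ∧
  (∀ x ∈ p.keys, pvF c (pvF p x) = pvF c x) ∧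
  (∀ x ∈ p.keys, ∀ y ∈ p.keys, pvF p x = x → pvF p y = y → pvF c x = pvF c y → x = y) ∧
  (∀ x ∈ p.keys, pvF p x ≠ x → m (pvF p x) < m x) ∧
  (∀ x ∈ p.keys, pvF p x = x → m x = 0) ∧
  (∀ x ∈ p.keys, m x < p.keys.countP (fun y => pvF c y = pvF c x))

theorem pvFindA_spec (fuel : Nat) (p c : PySem.Dict Int Int) (m : Int → Nat) (x : Int)
    (hI : pvInv p c m) (hx : x ∈ p.keys) (hf : m x < fuel) :
    pvInv (pvFindA fuel p x).1 c m ∧ (pvFindA fuel p x).1.keys = p.keys ∧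
    (pvFindA fuel p x).2 ∈ p.keys ∧
    pvF (pvFindA fuel p x).1 (pvFindA fuel p x).2 = (pvFindA fuel p x).2 ∧
    pvF c (pvFindA fuel p x).2 = pvF c x ∧
    (∀ y, pvF (pvFindA fuel p x).1 y = y ↔ pvF p y = y) := by
  induction fuel generalizing p x with
  | zero => omega
  | succ f ih =>
    obtain ⟨hkc, hnd, hcl, hcompat, hinj, hdec, hroot0, hbd⟩ := hI
    have hget : p.get? x = some (pvF p x) := pv_get?_mem p x hx
    by_cases hpx : pvF p x = x
    · have hred : pvFindA (f+1) p x = (p, x) := by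
        simp [pvFindA, hget, hpx]
      rw [hred]
      exact ⟨⟨hkc, hnd, hcl, hcompat, hinj, hdec, hroot0, hbd⟩, rfl, hx, hpx, rfl,
        fun y => Iff.rfl⟩
    · have hpxk : pvF p x ∈ p.keys := hcl x hx
      have hget2 : p.get? (pvF p x) = some (pvF p (pvF p x)) := pv_get?_mem p (pvF p x) hpxk
      have hred : pvFindA (f+1) p x = pvFindA f (p.insert x (pvF p (pvF p x))) (pvF p (pvF p x)) := by
        simp [pvFindA, hget, hpx, hget2]
      set px := pvF p x with hpxdef
      set ppx := pvF p px with hppxdef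
      -- m ppx < m x and ppx ≠ x
      have hmx : m px < m x := hdec x hx hpx
      have hm_ppx : m ppx < m x := by
        by_cases hr : pvF p px = px
        · rw [hppxdef, hr]; exact hmx
        · exact lt_trans (hdec px hpxk hr) hmx
      have hppx_ne : ppx ≠ x := by
        intro h; rw [h] at hm_ppx; omega
      have hppxk : ppx ∈ p.keys := hcl px hpxk
      set p' := p.insert x ppx with hp'def
      have hkeys' : p'.keys = p.keys := pv_keys_insert p x ppx hx
      have hpf' : ∀ z, pvF p' z = if z = x then ppx else pvF p z := fun z => pvF_insert p x ppx z
      -- rootness is unchanged by the halving step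
      have hroots : ∀ y, pvF p' y = y ↔ pvF p y = y := by
        intro y
        rw [hpf']
        by_cases hy : y = x
        · subst hy
          rw [if_pos rfl]
          constructor
          · intro h; exact absurd h hppx_ne
          · intro h; exact absurd h hpx
        · simp [hy]
      have hI' : pvInv p' c m := by
        refine ⟨hkeys' ▸ hkc, hkeys' ▸ hnd, ?_, ?_, ?_, ?_, ?_, ?_⟩
        · intro z hz; rw [hkeys'] at hz ⊢; rw [hpf']
          by_cases hzx : z = x
          · simp [hzx, hppxk]
          · simp [hzx]; exact hcl z hz
        · intro z hz; rw [hkeys'] at hz; rw [hpf']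
          by_cases hzx : z = x
          · subst hzx
            simp
            rw [hcompat px hpxk, hcompat z hz]
          · simp [hzx]; exact hcompat z hz
        · intro a ha b hb hra hrb hcab
          rw [hkeys'] at ha hb
          exact hinj a ha b hb ((hroots a).mp hra) ((hroots b).mp hrb) hcab
        · intro z hz hnr
          rw [hkeys'] at hz; rw [hpf'] at hnr ⊢
          by_cases hzx : z = x
          · subst hzx; simpa using hm_ppx
          · simp [hzx] at hnr ⊢; exact hdec z hz hnr
        · intro z hz hr
          rw [hkeys'] at hz
          exact hroot0 z hz ((hroots z).mp hr)
        · intro z hz; rw [hkeys'] at hz; rw [hkeys']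
          exact hbd z hz
      have hppxk' : ppx ∈ p'.keys := hkeys' ▸ hppxk
      have hf' : m ppx < f := by omega
      obtain ⟨c1, c2, c3, c4, c5, c6⟩ := ih p' ppx hI' hppxk' hf'
      rw [hred]
      refine ⟨c1, by rw [c2, hkeys'], hkeys' ▸ c3, c4, ?_, ?_⟩
      · rw [c5, hcompat px hpxk, hcompat x hx]
      · intro y; rw [c6 y, hroots y]

theorem pvMerge_inv (p2 c : PySem.Dict Int Int) (m : Int → Nat) (qx qy u v : Int)
    (hI : pvInv p2 c m) (hqx : qx ∈ p2.keys) (hqy : qy ∈ p2.keys)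
    (hrx : pvF p2 qx = qx) (hry : pvF p2 qy = qy) (hne : qx ≠ qy)
    (hu : u ∈ p2.keys) (hv : v ∈ p2.keys)
    (hset : (pvF c qx = pvF c u ∧ pvF c qy = pvF c v) ∨ (pvF c qx = pvF c v ∧ pvF c qy = pvF c u))
    (hcne : pvF c u ≠ pvF c v) :
    pvInv (p2.insert qy qx) (pvRelabel c (pvF c v) (pvF c u))
      (fun z => m z + (if pvF c z = pvF c qy then 1 else 0)) := by
  obtain ⟨hkc, hnd, hcl, hcompat, hinj, hdec, hroot0, hbd⟩ := hI
  set cu := pvF c u with hcu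
  set cv := pvF c v with hcv
  set c' := pvRelabel c cv cu with hc'def
  have hlab_ne : pvF c qx ≠ pvF c qy := by
    rcases hset with ⟨h1, h2⟩ | ⟨h1, h2⟩ <;> rw [h1, h2]
    · exact hcne
    · exact fun h => hcne h.symm
  have hk3 : (p2.insert qy qx).keys = p2.keys := pv_keys_insert p2 qy qx hqy
  have hpf3 : ∀ z, pvF (p2.insert qy qx) z = if z = qy then qx else pvF p2 z :=
    fun z => pvF_insert p2 qy qx z
  have hkc' : c'.keys = c.keys := pvRelabel_keys c cv cu
  have hcF : ∀ z ∈ p2.keys, pvF c' z = if pvF c z = cv then cu else pvF c z := by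
    intro z hz; exact pvF_relabel c cv cu z (hkc ▸ hz)
  -- rootness in the merged forest
  have hroots3 : ∀ z ∈ p2.keys, (pvF (p2.insert qy qx) z = z ↔ (z ≠ qy ∧ pvF p2 z = z)) := by
    intro z hz; rw [hpf3]
    by_cases hzq : z = qy
    · subst hzq; simp [hne]
    · simp [hzq]
  refine ⟨?_, hk3 ▸ hnd, ?_, ?_, ?_, ?_, ?_, ?_⟩
  · rw [hk3, hkc', hkc]
  · -- closure
    intro z hz; rw [hk3] at hz ⊢; rw [hpf3]
    by_cases hzq : z = qy
    · simp [hzq, hqx]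
    · simp [hzq]; exact hcl z hz
  · -- labels constant along pointers
    intro z hz; rw [hk3] at hz; rw [hpf3]
    by_cases hzq : z = qy
    · rw [if_pos hzq]
      rw [hcF qx hqx, hcF z hz, hzq]
      rcases hset with ⟨h1, h2⟩ | ⟨h1, h2⟩ <;> rw [h1, h2] <;>
        simp [hcne]
    · simp only [if_neg hzq]
      rw [hcF (pvF p2 z) (hcl z hz), hcF z hz, hcompat z hz]
  · -- distinct roots carry distinct labels
    intro a ha b hb hra hrb hab
    rw [hk3] at ha hb
    obtain ⟨haq, hra'⟩ := (hroots3 a ha).mp hra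
    obtain ⟨hbq, hrb'⟩ := (hroots3 b hb).mp hrb
    rw [hcF a ha, hcF b hb] at hab
    by_cases h1 : pvF c a = cv <;> by_cases h2 : pvF c b = cv
    · rw [← h2] at h1
      exact hinj a ha b hb hra' hrb' h1
    · -- a in v's class, b in u's class (label cu)
      rw [if_pos h1, if_neg h2] at hab
      -- the root with label cv and the root with label cu are qx,qy in some order
      rcases hset with ⟨hx1, hy1⟩ | ⟨hx1, hy1⟩
      · -- qx ↦ cu, qy ↦ cv
        exact absurd (hinj a ha qy hqy hra' hry (by rw [h1, hy1])) haq
      · exact absurd (hinj b hb qy hqy hrb' hry (by rw [← hab, hy1])) hbq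
    · rw [if_neg h1, if_pos h2] at hab
      rcases hset with ⟨hx1, hy1⟩ | ⟨hx1, hy1⟩
      · exact absurd (hinj b hb qy hqy hrb' hry (by rw [h2, hy1])) hbq
      · exact absurd (hinj a ha qy hqy hra' hry (by rw [hab, hy1])) haq
    · rw [if_neg h1, if_neg h2] at hab
      exact hinj a ha b hb hra' hrb' hab
  · -- measure decreases along pointers
    intro z hz hnr
    rw [hk3] at hz; rw [hpf3] at hnr ⊢
    by_cases hzq : z = qy
    · rw [if_pos hzq, hzq]
      have h0x : m qx = 0 := hroot0 qx hqx hrx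
      have h0y : m qy = 0 := hroot0 qy hqy hry
      simp [h0x, h0y, hlab_ne]
    · rw [if_neg hzq] at hnr ⊢
      have h1 := hdec z hz hnr
      have h2 := hcompat z hz
      by_cases hi : pvF c z = pvF c qy <;> simp [h2, hi] <;> omega
  · -- roots have measure 0
    intro z hz hr
    rw [hk3] at hz
    obtain ⟨hzq, hr'⟩ := (hroots3 z hz).mp hr
    have h0 : m z = 0 := hroot0 z hz hr'
    have hind : pvF c z ≠ pvF c qy := by
      intro h
      exact hzq (hinj z hz qy hqy hr' hry h)
    simp [h0, hind]
  · -- measure bounded by component size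
    intro z hz
    rw [hk3] at hz; rw [hk3]
    have hcnt_congr : ∀ (w : Int),
        p2.keys.countP (fun y => pvF c' y = w) =
          p2.keys.countP (fun y => (if pvF c y = cv then cu else pvF c y) = w) := by
      intro w
      apply List.countP_congr
      intro y hy
      rw [hcF y hy]
    have hcnt_pos_u : 0 < p2.keys.countP (fun y => pvF c y = cu) :=
      List.countP_pos_iff.mpr ⟨u, hu, by simp [hcu]⟩
    have hcnt_pos_v : 0 < p2.keys.countP (fun y => pvF c y = cv) :=
      List.countP_pos_iff.mpr ⟨v, hv, by simp [hcv]⟩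
    have hqy_lab : pvF c qy = cu ∨ pvF c qy = cv := by
      rcases hset with ⟨_, h2⟩ | ⟨_, h2⟩
      · right; exact h2
      · left; exact h2
    by_cases hz1 : pvF c z = cv
    · -- z's old class is cv; merged class has label cu
      have hz' : pvF c' z = cu := by rw [hcF z hz, if_pos hz1]
      rw [hz', hcnt_congr]
      have hsplit : p2.keys.countP (fun y => (if pvF c y = cv then cu else pvF c y) = cu) =
          p2.keys.countP (fun y => pvF c y = cu) + p2.keys.countP (fun y => pvF c y = cv) := by
        rw [← pvCountP_two p2.keys (pvF c) cu cv hcne]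
        apply List.countP_congr
        intro y _
        by_cases h : pvF c y = cv <;> simp [h]
      rw [hsplit]
      have := hbd z hz
      rw [hz1] at this
      by_cases hi : pvF c z = pvF c qy <;> simp [hi] <;> omega
    · by_cases hz2 : pvF c z = cu
      · have hz' : pvF c' z = cu := by rw [hcF z hz, if_neg hz1, hz2]
        rw [hz', hcnt_congr]
        have hsplit : p2.keys.countP (fun y => (if pvF c y = cv then cu else pvF c y) = cu) =
            p2.keys.countP (fun y => pvF c y = cu) + p2.keys.countP (fun y => pvF c y = cv) := by
          rw [← pvCountP_two p2.keys (pvF c) cu cv hcne]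
          apply List.countP_congr
          intro y _
          by_cases h : pvF c y = cv <;> simp [h]
        rw [hsplit]
        have := hbd z hz
        rw [hz2] at this
        by_cases hi : pvF c z = pvF c qy <;> simp [hi] <;> omega
      · -- untouched class
        have hz' : pvF c' z = pvF c z := by rw [hcF z hz, if_neg hz1]
        have hind : pvF c z ≠ pvF c qy := by
          rcases hqy_lab with h | h <;> rw [h] <;> assumption
        have hsame : p2.keys.countP (fun y => (if pvF c y = cv then cu else pvF c y) = pvF c z) =
            p2.keys.countP (fun y => pvF c y = pvF c z) := by
          apply List.countP_congr
          intro y _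
          by_cases h : pvF c y = cv
          · simp [h]
            constructor
            · intro hcuz; exact absurd hcuz.symm hz2
            · intro hcvz; exact absurd hcvz.symm hz1
          · simp [h]
        rw [hz', hcnt_congr, hsame]
        have := hbd z hz
        simp [hind]
        omega

theorem pvUnionA_spec (p r c : PySem.Dict Int Int) (m : Int → Nat) (u v : Int)
    (hI : pvInv p c m) (hu : u ∈ p.keys) (hv : v ∈ p.keys) :
    (pvUnionA p r u v).1.keys = p.keys ∧
    (pvUnionA p r u v).2.2 = !decide (pvF c u = pvF c v) ∧
    (pvF c u = pvF c v → pvInv (pvUnionA p r u v).1 c m) ∧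
    (pvF c u ≠ pvF c v → ∃ m', pvInv (pvUnionA p r u v).1 (pvRelabel c (pvF c v) (pvF c u)) m') := by
  have hf1 : m u < p.items.length := by
    have h1 := hI.2.2.2.2.2.2.2 u hu
    have h2 : (p.keys.countP (fun y => pvF c y = pvF c u)) ≤ p.keys.length :=
      List.countP_le_length
    rw [pv_keys_len] at h2; omega
  have F1 := pvFindA_spec p.items.length p c m u hI hu hf1
  set s1 := pvFindA p.items.length p u with hs1
  obtain ⟨I1, K1, hpx, R1, C1, RT1⟩ := F1
  have hf2 : m v < s1.1.items.length := by
    have h1 := I1.2.2.2.2.2.2.2 v (K1 ▸ hv)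
    have h2 : (s1.1.keys.countP (fun y => pvF c y = pvF c v)) ≤ s1.1.keys.length :=
      List.countP_le_length
    rw [pv_keys_len] at h2; omega
  have F2 := pvFindA_spec s1.1.items.length s1.1 c m v I1 (K1 ▸ hv) hf2
  set s2 := pvFindA s1.1.items.length s1.1 v with hs2
  obtain ⟨I2, K2, hpy, R2, C2, RT2⟩ := F2
  have hpxk : s1.2 ∈ s2.1.keys := by rw [K2, K1]; exact hpx
  have hpyk : s2.2 ∈ s2.1.keys := by rw [K2]; exact hpy
  have Rx2 : pvF s2.1 s1.2 = s1.2 := (RT2 s1.2).mpr R1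
  have hK2 : s2.1.keys = p.keys := by rw [K2, K1]
  by_cases hpq : s1.2 = s2.2
  · -- same root: same label
    have hlab : pvF c u = pvF c v := by rw [← C1, ← C2, hpq]
    have hred : pvUnionA p r u v = (s2.1, r, false) := by
      rw [pvUnionA, ← hs1, ← hs2, if_pos hpq]
    rw [hred]
    refine ⟨hK2, by simp [hlab], fun _ => I2, fun h => absurd hlab h⟩
  · -- different roots: different labels
    have hlab : pvF c u ≠ pvF c v := by
      intro h
      exact hpq (I2.2.2.2.2.1 s1.2 hpxk s2.2 hpyk Rx2 R2 (by rw [C1, C2, h]))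
    have hmerge : ∀ qx qy : Int, qx ∈ s2.1.keys → qy ∈ s2.1.keys →
        pvF s2.1 qx = qx → pvF s2.1 qy = qy → qx ≠ qy →
        ((pvF c qx = pvF c u ∧ pvF c qy = pvF c v) ∨ (pvF c qx = pvF c v ∧ pvF c qy = pvF c u)) →
        ∃ m', pvInv (s2.1.insert qy qx) (pvRelabel c (pvF c v) (pvF c u)) m' := by
      intro qx qy h1 h2 h3 h4 h5 h6
      exact ⟨_, pvMerge_inv s2.1 c m qx qy u v I2 h1 h2 h3 h4 h5
        (by rw [hK2]; exact hu) (by rw [hK2]; exact hv) h6 hlab⟩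
    by_cases hrk : r.getD s1.2 0 < r.getD s2.2 0
    · have hred : pvUnionA p r u v =
          (s2.1.insert s1.2 s2.2,
           (if r.getD s2.2 0 = r.getD s1.2 0 then r.insert s2.2 (r.getD s2.2 0 + 1) else r),
           true) := by
        rw [pvUnionA, ← hs1, ← hs2, if_neg hpq, if_pos hrk]
      rw [hred]
      refine ⟨by rw [pv_keys_insert _ _ _ hpxk]; exact hK2, by simp [hlab], fun h => absurd h hlab, fun _ => ?_⟩
      exact hmerge s2.2 s1.2 hpyk hpxk R2 Rx2 (fun h => hpq h.symm) (Or.inr ⟨C2, C1⟩)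
    · have hred : pvUnionA p r u v =
          (s2.1.insert s2.2 s1.2,
           (if r.getD s1.2 0 = r.getD s2.2 0 then r.insert s1.2 (r.getD s1.2 0 + 1) else r),
           true) := by
        rw [pvUnionA, ← hs1, ← hs2, if_neg hpq, if_neg hrk]
      rw [hred]
      refine ⟨by rw [pv_keys_insert _ _ _ hpyk]; exact hK2, by simp [hlab], fun h => absurd h hlab, fun _ => ?_⟩
      exact hmerge s1.2 s2.2 hpxk hpyk Rx2 R2 hpq (Or.inl ⟨C1, C2⟩)

theorem pvLoop (edges : List (Int × Int)) (p r c : PySem.Dict Int Int) (m : Int → Nat)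
    (tree extra : List (Int × Int)) (hI : pvInv p c m)
    (hpre : ∀ e ∈ edges, e.1 ∈ p.keys ∧ e.2 ∈ p.keys) :
    (edges.foldl pvStepA (p, r, tree, extra)).2.2 = (edges.foldl pvStepB (c, tree, extra)).2 := by
  induction edges generalizing p r c m tree extra with
  | nil => rfl
  | cons e es ih =>
    obtain ⟨hu, hv⟩ := hpre e (List.mem_cons_self)
    have hkc := hI.1
    obtain ⟨hK, hFlag, hEq, hNe⟩ := pvUnionA_spec p r c m e.1 e.2 hI hu hv
    have hgu : c.get? e.1 = some (pvF c e.1) := pv_get?_mem c e.1 (hkc ▸ hu)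
    have hgv : c.get? e.2 = some (pvF c e.2) := pv_get?_mem c e.2 (hkc ▸ hv)
    simp only [List.foldl_cons]
    have hpre' : ∀ e' ∈ es, e'.1 ∈ p.keys ∧ e'.2 ∈ p.keys :=
      fun e' he' => hpre e' (List.mem_cons_of_mem _ he')
    by_cases hc : pvF c e.1 = pvF c e.2
    · have hA : pvStepA (p, r, tree, extra) e =
          ((pvUnionA p r e.1 e.2).1, (pvUnionA p r e.1 e.2).2.1, tree, extra ++ [e]) := by
        rw [pvStepA]
        simp [hFlag, hc]
      have hB : pvStepB (c, tree, extra) e = (c, tree, extra ++ [e]) := by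
        rw [pvStepB]
        simp [hgu, hgv, hc]
      rw [hA, hB]
      exact ih _ _ _ m _ _ (hEq hc) (fun e' he' => hK ▸ hpre' e' he')
    · obtain ⟨m', hI'⟩ := hNe hc
      have hA : pvStepA (p, r, tree, extra) e =
          ((pvUnionA p r e.1 e.2).1, (pvUnionA p r e.1 e.2).2.1, tree ++ [e], extra) := by
        rw [pvStepA]
        simp [hFlag, hc]
      have hB : pvStepB (c, tree, extra) e =
          (pvRelabel c (pvF c e.2) (pvF c e.1), tree ++ [e], extra) := by
        rw [pvStepB]
        simp [hgu, hgv, hc]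
      rw [hA, hB]
      exact ih _ _ _ m' _ _ hI' (fun e' he' => hK ▸ hpre' e' he')

theorem pv_init_pvF (nodes : List Int) (z : Int) :
    pvF (nodes.foldl (fun d n => d.insert n n) PySem.Dict.empty) z = z := by
  rw [pvF, PySem.Dict.getD_eq_get?_getD, pv_init_get?]
  by_cases h : z ∈ nodes <;> simp [h]

theorem pv_init_mem (nodes : List Int) (z : Int) :
    z ∈ (nodes.foldl (fun d n => d.insert n n) PySem.Dict.empty).keys ↔ z ∈ nodes := by
  constructor
  · intro h
    by_contra hn
    have := (PySem.Dict.get?_eq_none_iff_not_mem_keys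
        (nodes.foldl (fun d n => d.insert n n) PySem.Dict.empty) z).mp
      (by rw [pv_init_get?]; rw [if_neg hn]; rfl)
    exact this h
  · intro h
    by_contra hn
    have h2 := (PySem.Dict.get?_eq_none_iff_not_mem_keys _ z).mpr hn
    rw [pv_init_get?] at h2
    simp [h] at h2

theorem pv_init_inv (nodes : List Int) :
    pvInv (nodes.foldl (fun d n => d.insert n n) PySem.Dict.empty)
      (nodes.foldl (fun d n => d.insert n n) PySem.Dict.empty) (fun _ => 0) := by
  refine ⟨rfl, ?_, ?_, ?_, ?_, ?_, ?_, ?_⟩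
  · exact PySem.Dict.nodup_keys_foldl_insert nodes (fun _ x => x) _ PySem.Dict.nodup_keys_empty
  · intro x hx; rw [pv_init_pvF]; exact hx
  · intro x _; rw [pv_init_pvF]
  · intro x _ y _ _ _ h; rw [pv_init_pvF, pv_init_pvF] at h; exact h
  · intro x _ h; exact absurd (pv_init_pvF nodes x) h
  · intro x _ _; rfl
  · intro x hx
    apply List.countP_pos_iff.mpr
    exact ⟨x, hx, by simp⟩


-- ===== VERDICT (by name: the statement is the Claim_ definition above) =====
theorem find_spanning_tree_spec : Claim_equal_find_spanning_tree := by
  intro nodes edges _ hpre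
  show find_spanning_tree nodes edges = find_spanning_tree_alt nodes edges
  have hpre' : ∀ e ∈ edges,
      e.1 ∈ (nodes.foldl (fun d n => d.insert n n) PySem.Dict.empty).keys ∧
      e.2 ∈ (nodes.foldl (fun d n => d.insert n n) PySem.Dict.empty).keys :=
    fun e he => ⟨(pv_init_mem nodes e.1).mpr (hpre e he).1,
                 (pv_init_mem nodes e.2).mpr (hpre e he).2⟩
  have h := pvLoop edges (nodes.foldl (fun d n => d.insert n n) PySem.Dict.empty)
    (nodes.foldl (fun d n => d.insert n (0 : Int)) PySem.Dict.empty)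
    (nodes.foldl (fun d n => d.insert n n) PySem.Dict.empty)
    (fun _ => 0) [] [] (pv_init_inv nodes) hpre'
  simp only [find_spanning_tree, find_spanning_tree_alt]
  rw [h]
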